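-- pv_equiv track=rewrite | github.com/epilectrik/voynich | phases/MIXED_marker_entry_analysis/mixed_entry_tests.py | get_marker_class
-- ===== SOURCE A (Python) =====
-- MARKERS = ['ch', 'qo', 'sh', 'da', 'ok', 'ot', 'ct', 'ol']
--
-- def get_marker_class(word):
--     """Determine which marker class(es) a word belongs to."""
--     if not word:
--         return set()
--
--     markers = set()
--     for m in MARKERS:
--         if word.startswith(m):
--             markers.add(m.upper())
--             break  # Only one prefix per word
--
--     return markers
-- ===== SOURCE B (Python) =====
-- MARKER_SET = frozenset(['ch', 'qo', 'sh', 'da', 'ok', 'ot', 'ct', 'ol'])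
--
-- def get_marker_class(word):
--     """Determine which marker class(es) a word belongs to."""
--     p = word[:2]
--     if p in MARKER_SET:
--         return {p.upper()}
--     return set()
-- ===== Notes on version B (the rewrite author's own statement) =====
-- stated objective: simpler
-- what changed: All markers are two characters long, so B replaces the per-marker prefix loop (with break) by computing the two-character prefix once and doing a single membership test against a frozenset of markers; the empty-word guard becomes unnecessary.
import Mathlib
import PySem

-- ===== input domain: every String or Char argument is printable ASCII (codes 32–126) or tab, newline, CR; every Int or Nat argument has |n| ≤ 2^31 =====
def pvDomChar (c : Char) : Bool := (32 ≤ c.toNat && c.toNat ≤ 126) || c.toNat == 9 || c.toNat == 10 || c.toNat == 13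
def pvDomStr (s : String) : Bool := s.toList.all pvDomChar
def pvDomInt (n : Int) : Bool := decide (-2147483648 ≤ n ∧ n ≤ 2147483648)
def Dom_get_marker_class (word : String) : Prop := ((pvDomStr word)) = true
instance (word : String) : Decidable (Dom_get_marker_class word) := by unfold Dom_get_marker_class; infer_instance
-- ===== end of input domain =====

-- B replaces A's per-marker prefix loop by one two-character slice and a single set membership test (simpler).

-- ===== PORT A =====
def pvMARKERS : List String := ["ch", "qo", "sh", "da", "ok", "ot", "ct", "ol"]

-- the for-loop over MARKERS with break: first matching marker only
def pvMarkerLoopA (word : String) : List String → PySem.Set String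
  | [] => PySem.Set.empty
  | m :: rest =>
    if PySem.Str.startswith word m then
      PySem.Set.add PySem.Set.empty (PySem.Str.upper m)
    else pvMarkerLoopA word rest

def get_marker_class (word : String) : List String :=
  if word = "" then PySem.Set.empty
  else pvMarkerLoopA word pvMARKERS

-- ===== PORT B =====
def pvMARKER_SET : PySem.Set String := PySem.Set.ofList ["ch", "qo", "sh", "da", "ok", "ot", "ct", "ol"]

def get_marker_class_alt (word : String) : List String :=
  let p := PySem.Str.slice word none (some 2)
  if PySem.Set.contains pvMARKER_SET p then
    PySem.Set.add PySem.Set.empty (PySem.Str.upper p)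
  else PySem.Set.empty

-- ===== PRECONDITION & SPEC =====
def Spec_get_marker_class (word : String) (out : List String) : Prop := out = get_marker_class_alt word
instance (word : String) (out : List String) : Decidable (Spec_get_marker_class word out) := by unfold Spec_get_marker_class; infer_instance

-- ===== CLAIM (what is proved, stated in full; the proofs are below) =====
def Claim_equal_get_marker_class : Prop := ∀ (word : String), Dom_get_marker_class word → Spec_get_marker_class word (get_marker_class word)

-- ===== LEMMAS AND PROOFS =====
lemma pv_prefix2 (a b : Char) (l : List Char) : ([a,b] <+: l) ↔ l.take 2 = [a,b] := by
  match l with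
  | [] => simp
  | [c] => simp [List.cons_prefix_iff]
  | c :: d :: t => simp [List.cons_prefix_iff, eq_comm]

lemma pv_key (word : String) : get_marker_class word = get_marker_class_alt word := by
  have hpt : (PySem.Str.slice word none (some 2)).toList = word.toList.take 2 := by
    simp [PySem.Str.toList_slice, PySem.List.slice_to]
  set p := PySem.Str.slice word none (some 2) with hp
  have hsw : ∀ (m : String) (a b : Char), m.toList = [a,b] →
      (PySem.Str.startswith word m = (decide (p = m))) := by
    intro m a b hm
    rw [Bool.eq_iff_iff, decide_eq_true_iff]
    have h1 : PySem.Str.startswith word m = true ↔ m.toList <+: word.toList := by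
      simp; exact PySem.Chars.startswith_iff _ _
    rw [h1, hm, pv_prefix2, ← hm, ← hpt]
    exact ⟨fun h => String.toList_inj.mp h.symm |>.symm, fun h => by rw [h]⟩
  clear_value p
  by_cases hw : word = ""
  · subst hw
    have hpe : p = "" := String.toList_inj.mp (by simpa using hpt)
    simp [get_marker_class, get_marker_class_alt, ← hp, hpe]
    decide
  · simp only [get_marker_class, get_marker_class_alt, pvMarkerLoopA, pvMARKERS, if_neg hw, ← hp]
    rw [hsw "ch" 'c' 'h' rfl, hsw "qo" 'q' 'o' rfl, hsw "sh" 's' 'h' rfl,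
        hsw "da" 'd' 'a' rfl, hsw "ok" 'o' 'k' rfl, hsw "ot" 'o' 't' rfl,
        hsw "ct" 'c' 't' rfl, hsw "ol" 'o' 'l' rfl]
    by_cases h1 : p = "ch"
    · subst h1; decide
    all_goals by_cases h2 : p = "qo"
    · subst h2; decide
    all_goals by_cases h3 : p = "sh"
    · subst h3; decide
    all_goals by_cases h4 : p = "da"
    · subst h4; decide
    all_goals by_cases h5 : p = "ok"
    · subst h5; decide
    all_goals by_cases h6 : p = "ot"
    · subst h6; decide
    all_goals by_cases h7 : p = "ct"
    · subst h7; decide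
    all_goals by_cases h8 : p = "ol"
    · subst h8; decide
    · simp only [h1, h2, h3, h4, h5, h6, h7, h8, decide_false]
      have hc : PySem.Set.contains pvMARKER_SET p = false := by
        simp [pvMARKER_SET, PySem.Set.contains, PySem.Set.ofList, PySem.Set.add, h1, h2, h3, h4, h5, h6, h7, h8]
      rw [hc]
      simp [PySem.Set.empty]

-- ===== VERDICT (by name: the statement is the Claim_ definition above) =====
theorem get_marker_class_spec : Claim_equal_get_marker_class := by
  intro word _
  exact pv_key word
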